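-- pv_equiv track=rewrite | github.com/arm/device-connect | packages/device-connect-edge/tests/fuzz/run_atheris.py | extract_crash_info
-- ===== SOURCE A (Python) =====
-- def extract_crash_info(stdout, stderr):
--     """Extract crash details from atheris output.
--
--     The Python traceback goes to stdout, while libFuzzer summary
--     and artifact paths go to stderr.
--     """
--     combined = stdout + "\n" + stderr
--     lines = combined.strip().split("\n")
--     crash_lines = []
--     capture = False
--     for line in lines:
--         if "Uncaught Python exception" in line:
--             capture = True
--         if capture:
--             # Skip noisy instrumentation/libfuzzer info/stats lines
--             if line.startswith(("INFO:", "WARNING:", "#")):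
--                 continue
--             crash_lines.append(line)
--             if line.startswith("artifact_prefix"):
--                 break
--     return "\n".join(crash_lines) if crash_lines else None
-- ===== SOURCE B (Python) =====
-- def extract_crash_info(stdout, stderr):
--     """Extract crash details from atheris output (staged-passes version).
--
--     Stage 1: locate the first line containing the exception marker.
--     Stage 2: cut the suffix right after the first artifact_prefix line.
--     Stage 3: drop noisy INFO:/WARNING:/# lines with a comprehension.
--     Correct because an 'artifact_prefix' line can never start with a noise
--     prefix, so cutting before filtering changes nothing.
--     """
--     lines = (stdout + "\n" + stderr).strip().split("\n")
--     marker = "Uncaught Python exception"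
--     suffix = None
--     for i, line in enumerate(lines):
--         if marker in line:
--             suffix = lines[i:]
--             break
--     if suffix is None:
--         return None
--     for j, line in enumerate(suffix):
--         if line.startswith("artifact_prefix"):
--             suffix = suffix[:j + 1]
--             break
--     kept = [l for l in suffix if not l.startswith(("INFO:", "WARNING:", "#"))]
--     return "\n".join(kept) if kept else None
-- ===== Notes on version B (the rewrite author's own statement) =====
-- stated objective: simpler
-- what changed: Replaces A's single interleaved pass (capture flag, per-line skip-continue and break) with three staged passes: locate the marker line, cut the suffix after the first artifact_prefix line, then filter noise lines with a comprehension; correct because no artifact_prefix line matches a noise prefix, so cut and filter commute.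
import Mathlib
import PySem

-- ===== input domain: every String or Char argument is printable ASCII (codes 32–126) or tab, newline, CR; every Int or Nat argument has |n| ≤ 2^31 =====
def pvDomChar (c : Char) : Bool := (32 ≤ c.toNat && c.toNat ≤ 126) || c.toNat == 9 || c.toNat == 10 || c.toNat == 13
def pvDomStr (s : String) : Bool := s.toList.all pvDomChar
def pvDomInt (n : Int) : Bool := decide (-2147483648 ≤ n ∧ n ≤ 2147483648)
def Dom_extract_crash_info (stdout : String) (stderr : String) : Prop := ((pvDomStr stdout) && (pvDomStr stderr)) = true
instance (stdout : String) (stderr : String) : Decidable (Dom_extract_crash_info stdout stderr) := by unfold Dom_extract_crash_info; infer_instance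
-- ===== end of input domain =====

-- B replaces A's flag-driven single pass by three staged passes (locate / cut / filter); same O(n) cost, simpler.


-- shared line predicates (the literal string constants of both Pythons)
def pvNeedle : List Char := "Uncaught Python exception".toList
def pvSkip (l : List Char) : Bool :=
  PySem.Chars.startswith l "INFO:".toList || PySem.Chars.startswith l "WARNING:".toList ||
    PySem.Chars.startswith l "#".toList
def pvArtifact (l : List Char) : Bool := PySem.Chars.startswith l "artifact_prefix".toList

-- ===== PORT A =====
-- A's loop: one pass with a capture flag; `break` ported as returning the accumulator.
def pvLoopA : List (List Char) → Bool → List (List Char) → List (List Char)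
  | [], _, acc => acc
  | l :: ls, capture, acc =>
    let capture := capture || PySem.Chars.isIn pvNeedle l
    if capture then
      if pvSkip l then pvLoopA ls capture acc
      else if pvArtifact l then acc ++ [l]
      else pvLoopA ls capture (acc ++ [l])
    else pvLoopA ls capture acc

def extract_crash_info (stdout : String) (stderr : String) : Option String :=
  let combined := stdout.toList ++ '\n' :: stderr.toList
  let lines := PySem.Chars.splitOn (PySem.Chars.strip combined) ['\n']
  let crash_lines := pvLoopA lines false []
  if crash_lines.isEmpty then none else some (String.ofList (PySem.Chars.join ['\n'] crash_lines))

-- ===== PORT B =====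
-- B stage 1: the suffix of lines starting at the first line containing the marker (none if absent).
def pvFindStart : List (List Char) → Option (List (List Char))
  | [] => none
  | l :: ls => if PySem.Chars.isIn pvNeedle l then some (l :: ls) else pvFindStart ls

-- B stage 2: cut the suffix right after the first artifact_prefix line (keep everything if none).
def pvCut : List (List Char) → List (List Char)
  | [] => []
  | l :: ls => if pvArtifact l then [l] else l :: pvCut ls

def extract_crash_info_alt (stdout : String) (stderr : String) : Option String :=
  let lines := PySem.Chars.splitOn (PySem.Chars.strip (stdout.toList ++ '\n' :: stderr.toList)) ['\n']
  match pvFindStart lines with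
  | none => none
  | some suf =>
    -- B stage 3: filter the noise lines from the cut segment
    let kept := (pvCut suf).filter (fun l => !pvSkip l)
    if kept.isEmpty then none else some (String.ofList (PySem.Chars.join ['\n'] kept))

-- ===== PRECONDITION & SPEC =====
def Spec_extract_crash_info (stdout : String) (stderr : String) (out : Option String) : Prop := out = extract_crash_info_alt stdout stderr
instance (stdout : String) (stderr : String) (out : Option String) : Decidable (Spec_extract_crash_info stdout stderr out) := by unfold Spec_extract_crash_info; infer_instance

-- ===== CLAIM (what is proved, stated in full; the proofs are below) =====
def Claim_equal_extract_crash_info : Prop := ∀ (stdout : String) (stderr : String), Dom_extract_crash_info stdout stderr → Spec_extract_crash_info stdout stderr (extract_crash_info stdout stderr)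

-- ===== LEMMAS AND PROOFS =====

-- An artifact_prefix line never starts with a noise prefix (first characters differ).
theorem pvArtifact_not_skip (l : List Char) (h : pvArtifact l = true) : pvSkip l = false := by
  unfold pvArtifact at h
  rw [PySem.Chars.startswith_iff] at h
  obtain ⟨t, rfl⟩ := h
  rw [show ("artifact_prefix".toList : List Char) = 'a' :: "rtifact_prefix".toList from by decide]
  simp only [pvSkip, Bool.or_eq_false_iff]
  refine ⟨⟨?_, ?_⟩, ?_⟩ <;> simp [PySem.Chars.startswith, List.isPrefixOf]

-- Once the flag is set, A's pass equals the filtered cut segment appended to the accumulator.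
theorem pvLoopA_true (ls : List (List Char)) (acc : List (List Char)) :
    pvLoopA ls true acc = acc ++ (pvCut ls).filter (fun l => !pvSkip l) := by
  induction ls generalizing acc with
  | nil => simp [pvLoopA, pvCut]
  | cons l ls ih =>
    simp only [pvLoopA, pvCut, Bool.true_or, if_true]
    by_cases hs : pvSkip l = true
    · by_cases ha : pvArtifact l = true
      · rw [pvArtifact_not_skip l ha] at hs; cases hs
      · simp only [hs, if_true, ha, Bool.false_eq_true, if_false, List.filter_cons,
          Bool.not_true, if_false]
        exact ih acc
    · by_cases ha : pvArtifact l = true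
      · simp [hs, ha, List.filter]
      · simp only [hs, ha, Bool.false_eq_true, if_false, List.filter_cons]
        rw [ih (acc ++ [l])]
        simp

-- Before the flag is set, A only scans for the marker: locate, then the cut+filter stages.
theorem pvLoopA_false (ls : List (List Char)) (acc : List (List Char)) :
    pvLoopA ls false acc =
      acc ++ (match pvFindStart ls with
              | none => []
              | some suf => (pvCut suf).filter (fun l => !pvSkip l)) := by
  induction ls generalizing acc with
  | nil => simp [pvLoopA, pvFindStart]
  | cons l ls ih =>
    simp only [pvLoopA, pvFindStart, Bool.false_or]
    by_cases h : PySem.Chars.isIn pvNeedle l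
    · simp only [h, if_true]
      by_cases hs : pvSkip l = true
      · by_cases ha : pvArtifact l = true
        · rw [pvArtifact_not_skip l ha] at hs; cases hs
        · simp only [hs, if_true]
          rw [pvLoopA_true]
          simp [pvCut, ha, hs]
      · by_cases ha : pvArtifact l = true
        · simp [hs, ha, pvCut, List.filter]
        · simp only [hs, if_false, ha, Bool.false_eq_true]
          rw [pvLoopA_true]
          simp [pvCut, ha, hs]
    · simp only [h, Bool.false_eq_true, if_false]
      exact ih acc

-- ===== VERDICT (by name: the statement is the Claim_ definition above) =====
theorem extract_crash_info_spec : Claim_equal_extract_crash_info := by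
  intro stdout stderr _
  unfold Spec_extract_crash_info extract_crash_info extract_crash_info_alt
  simp only []
  rw [pvLoopA_false]
  cases h : pvFindStart (PySem.Chars.splitOn (PySem.Chars.strip (stdout.toList ++ '\n' :: stderr.toList)) ['\n']) with
  | none => simp
  | some suf => simp
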